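-- pv_equiv track=rewrite | github.com/CoderHoooK/HTSATNet | graph/graph.py | get_edgeset
-- ===== SOURCE A (Python) =====
-- def get_groups(dataset='NTU', CoM=21):
--     groups  =[]
--
--     if dataset == 'NTU':
--         if CoM == 2:
--             groups.append([2])
--             groups.append([1, 21])
--             groups.append([13, 17, 3, 5, 9])
--             groups.append([14, 18, 4, 6, 10])
--             groups.append([15, 19, 7, 11])
--             groups.append([16, 20, 8, 12])
--             groups.append([22, 23, 24, 25])
--
--         ## Center of mass : 21
--         elif CoM == 21:
--             groups.append([21])
--             groups.append([2, 3, 5, 9])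
--             groups.append([4, 6, 10, 1])
--             groups.append([7, 11, 13, 17])
--             groups.append([8, 12, 14, 18])
--             groups.append([22, 23, 24, 25, 15, 19])
--             groups.append([16, 20])
--
--         ## Center of Mass : 1
--         elif CoM == 1:
--             groups.append([1])
--             groups.append([2, 13, 17])
--             groups.append([14, 18, 21])
--             groups.append([3, 5, 9, 15, 19])
--             groups.append([4, 6, 10, 16, 20])
--             groups.append([7, 11])
--             groups.append([8, 12, 22, 23, 24, 25])
--
--         else:
--             raise ValueError()
--
--     return groups
--
-- def get_edgeset(dataset='NTU', CoM=21):
--     groups = get_groups(dataset=dataset, CoM=CoM)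
--
--     for i, group in enumerate(groups):
--         group = [i - 1 for i in group]
--         groups[i] = group
--
--     identity = []
--     forward_hierarchy = []
--     reverse_hierarchy = []
--
--     for i in range(len(groups) - 1):
--         self_link = groups[i] + groups[i + 1]
--         self_link = [(i, i) for i in self_link]
--         identity.append(self_link)
--         forward_g = []
--         for j in groups[i]:
--             for k in groups[i + 1]:
--                 forward_g.append((j, k))
--         forward_hierarchy.append(forward_g)
--
--         reverse_g = []
--         for j in groups[-1 - i]:
--             for k in groups[-2 - i]:
--                 reverse_g.append((j, k))
--         reverse_hierarchy.append(reverse_g)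
--     edges = []
--     for i in range(len(groups) - 1):
--         edges.append([identity[i], forward_hierarchy[i], reverse_hierarchy[-1 - i]])
--
--     return edges
-- ===== SOURCE B (Python) =====
-- def get_groups(dataset='NTU', CoM=21):
--     groups = []
--     if dataset == 'NTU':
--         if CoM == 2:
--             groups.append([2])
--             groups.append([1, 21])
--             groups.append([13, 17, 3, 5, 9])
--             groups.append([14, 18, 4, 6, 10])
--             groups.append([15, 19, 7, 11])
--             groups.append([16, 20, 8, 12])
--             groups.append([22, 23, 24, 25])
--         elif CoM == 21:
--             groups.append([21])
--             groups.append([2, 3, 5, 9])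
--             groups.append([4, 6, 10, 1])
--             groups.append([7, 11, 13, 17])
--             groups.append([8, 12, 14, 18])
--             groups.append([22, 23, 24, 25, 15, 19])
--             groups.append([16, 20])
--         elif CoM == 1:
--             groups.append([1])
--             groups.append([2, 13, 17])
--             groups.append([14, 18, 21])
--             groups.append([3, 5, 9, 15, 19])
--             groups.append([4, 6, 10, 16, 20])
--             groups.append([7, 11])
--             groups.append([8, 12, 22, 23, 24, 25])
--         else:
--             raise ValueError()
--     return groups
--
--
-- def _cross(xs, ys):
--     return [(j, k) for j in xs for k in ys]
--
--
-- def _build(gs):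
--     # structural recursion over adjacent pairs of layers
--     if len(gs) < 2:
--         return []
--     a, b = gs[0], gs[1]
--     triple = [[(v, v) for v in a + b], _cross(a, b), _cross(b, a)]
--     return [triple] + _build(gs[1:])
--
--
-- def get_edgeset(dataset='NTU', CoM=21):
--     groups = [[v - 1 for v in g] for g in get_groups(dataset=dataset, CoM=CoM)]
--     return _build(groups)
-- ===== Notes on version B (the rewrite author's own statement) =====
-- stated objective: simpler
-- what changed: B replaces A's index-driven staging (three intermediate tables filled over range(len-1), then a reassembly loop reading reverse_hierarchy[-1-i]) with a structural recursion over the list of layers: each step consumes the head pair (a,b), emits [self-loops, a x b, b x a] via a cross-product helper, and recurses on the tail, so no indices or intermediate tables exist.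
import Mathlib
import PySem

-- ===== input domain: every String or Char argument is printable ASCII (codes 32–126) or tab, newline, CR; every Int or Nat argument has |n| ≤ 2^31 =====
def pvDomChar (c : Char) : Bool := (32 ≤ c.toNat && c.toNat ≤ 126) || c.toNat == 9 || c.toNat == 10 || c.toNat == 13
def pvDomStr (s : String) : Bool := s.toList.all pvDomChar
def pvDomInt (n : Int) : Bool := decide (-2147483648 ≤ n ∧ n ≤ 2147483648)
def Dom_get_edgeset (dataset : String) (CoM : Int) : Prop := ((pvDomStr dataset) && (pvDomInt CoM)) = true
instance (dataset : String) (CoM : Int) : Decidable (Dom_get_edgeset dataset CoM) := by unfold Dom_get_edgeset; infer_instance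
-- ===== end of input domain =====

-- B replaces A's index-driven staged tables with a structural recursion over adjacent
-- layer pairs, emitting each [self-loops, forward, reverse] triple directly (same cost).

-- ===== PORT A =====
-- get_groups: the fixed skeleton tables; on the 'NTU' + unknown-CoM branch Python raises
-- ValueError — those inputs are excluded by Pre_get_edgeset, here the helper returns [].
def pvGetGroups (dataset : String) (CoM : Int) : List (List Int) :=
  if dataset = "NTU" then
    if CoM = 2 then
      [[2],[1,21],[13,17,3,5,9],[14,18,4,6,10],[15,19,7,11],[16,20,8,12],[22,23,24,25]]
    else if CoM = 21 then
      [[21],[2,3,5,9],[4,6,10,1],[7,11,13,17],[8,12,14,18],[22,23,24,25,15,19],[16,20]]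
    else if CoM = 1 then
      [[1],[2,13,17],[14,18,21],[3,5,9,15,19],[4,6,10,16,20],[7,11],[8,12,22,23,24,25]]
    else []
  else []

-- A's body after get_groups: build the identity / forward_hierarchy / reverse_hierarchy
-- tables over range(len(groups)-1), then reassemble edges with reverse_hierarchy[-1-i].
-- (all indices are in range on Pre_, so the '.getD []' default is never taken)
def pvBuildA (groups : List (List Int)) : List (List (List (Int × Int))) :=
  let n : Int := groups.length
  let st := (PySem.List.pyRange 0 (n - 1) 1).foldl
    (fun (st : List (List (Int × Int)) × List (List (Int × Int)) × List (List (Int × Int))) i =>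
      let gi := (PySem.List.pyGet? groups i).getD []
      let gi1 := (PySem.List.pyGet? groups (i + 1)).getD []
      let self_link := (gi ++ gi1).map (fun v => (v, v))
      let forward_g := gi.foldl (fun acc j => gi1.foldl (fun acc k => acc ++ [(j, k)]) acc) []
      let gm1 := (PySem.List.pyGet? groups (-1 - i)).getD []
      let gm2 := (PySem.List.pyGet? groups (-2 - i)).getD []
      let reverse_g := gm1.foldl (fun acc j => gm2.foldl (fun acc k => acc ++ [(j, k)]) acc) []
      (st.1 ++ [self_link], st.2.1 ++ [forward_g], st.2.2 ++ [reverse_g]))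
    ([], [], [])
  (PySem.List.pyRange 0 (n - 1) 1).foldl
    (fun edges i =>
      edges ++ [[(PySem.List.pyGet? st.1 i).getD [],
                 (PySem.List.pyGet? st.2.1 i).getD [],
                 (PySem.List.pyGet? st.2.2 (-1 - i)).getD []]])
    []

def get_edgeset (dataset : String) (CoM : Int) : List (List (List (Int × Int))) :=
  pvBuildA ((pvGetGroups dataset CoM).map (fun g => g.map (fun i => i - 1)))

-- ===== PORT B =====
def pvCross (xs ys : List Int) : List (Int × Int) :=
  xs.flatMap (fun j => ys.map (fun k => (j, k)))

-- structural recursion over adjacent pairs of layers (Source B's _build)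
def pvBuildB : List (List Int) → List (List (List (Int × Int)))
  | a :: b :: rest =>
      [(a ++ b).map (fun v => (v, v)), pvCross a b, pvCross b a] :: pvBuildB (b :: rest)
  | _ => []

def get_edgeset_alt (dataset : String) (CoM : Int) : List (List (List (Int × Int))) :=
  pvBuildB ((pvGetGroups dataset CoM).map (fun g => g.map (fun v => v - 1)))

-- ===== PRECONDITION & SPEC =====
-- Pre_ excludes exactly the inputs where A raises ValueError: dataset 'NTU' with a CoM
-- other than 1, 2, 21 (B raises there too).
def Pre_get_edgeset (dataset : String) (CoM : Int) : Prop :=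
  dataset ≠ "NTU" ∨ CoM = 1 ∨ CoM = 2 ∨ CoM = 21
instance (dataset : String) (CoM : Int) : Decidable (Pre_get_edgeset dataset CoM) := by
  unfold Pre_get_edgeset; infer_instance
def pvWitness_get_edgeset : String × Int := ("NTU", 21)

def Spec_get_edgeset (dataset : String) (CoM : Int) (out : List (List (List (Int × Int)))) : Prop := out = get_edgeset_alt dataset CoM
instance (dataset : String) (CoM : Int) (out : List (List (List (Int × Int)))) : Decidable (Spec_get_edgeset dataset CoM out) := by unfold Spec_get_edgeset; infer_instance

-- ===== CLAIM (what is proved, stated in full; the proofs are below) =====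
def Claim_equal_get_edgeset : Prop := ∀ (dataset : String) (CoM : Int), Dom_get_edgeset dataset CoM → Pre_get_edgeset dataset CoM → Spec_get_edgeset dataset CoM (get_edgeset dataset CoM)

-- ===== LEMMAS AND PROOFS =====

-- ===== VERDICT (by name: the statement is the Claim_ definition above) =====
theorem get_edgeset_spec : Claim_equal_get_edgeset := by
  intro dataset CoM _ hpre
  unfold Spec_get_edgeset get_edgeset get_edgeset_alt
  by_cases h : dataset = "NTU"
  · subst h
    rcases hpre with h' | h1 | h2 | h21
    · exact absurd rfl h'
    · subst h1; decide
    · subst h2; decide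
    · subst h21; decide
  · simp [pvGetGroups, h, pvBuildA, pvBuildB]
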